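-- pv_equiv track=rewrite | github.com/Sumo-e/Zero-Information-Traders | graphs.py | find_equilibrium
-- ===== SOURCE A (Python) =====
-- def find_equilibrium(costs, redemptions) -> tuple:
--     if type(costs) != list:
--         raise ValueError("Costs must be a list")
--     if type(redemptions) != list:
--         raise ValueError("Redemptions must be a list")
--
--     costs = sorted(costs)
--     redemptions = sorted(redemptions, reverse=True)
--
--     for i in range(len(redemptions)):
--         # When the values overlap normally
--         if redemptions[i] == costs[i]:
--             eq_p = redemptions[i]
--             eq_q = i
--             return (eq_q, eq_p)
--
--         # Of the lowest rungs, price becomes the highest (highest price limits)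
--         if redemptions[i] < costs[i]:
--             eq_p = max(redemptions[i], costs[i-1])
--             eq_q = i
--             return (eq_q, eq_p)
--
--     # If an equilibrium can't be found, this should hide that
--     return (-1, -1)
-- ===== SOURCE B (Python) =====
-- def find_equilibrium(costs, redemptions) -> tuple:
--     if type(costs) != list:
--         raise ValueError("Costs must be a list")
--     if type(redemptions) != list:
--         raise ValueError("Redemptions must be a list")
--
--     cs = sorted(costs)
--     rs = sorted(redemptions, reverse=True)
--
--     # rs is non-increasing and cs non-decreasing, so "rs[i] <= cs[i]" is a
--     # monotone predicate: binary-search for the first crossing index.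
--     n = min(len(cs), len(rs))
--     lo, hi = 0, n
--     while lo < hi:
--         mid = (lo + hi) // 2
--         if rs[mid] <= cs[mid]:
--             hi = mid
--         else:
--             lo = mid + 1
--     if lo == n:
--         return (-1, -1)
--     if rs[lo] == cs[lo]:
--         return (lo, rs[lo])
--     return (lo, max(rs[lo], cs[lo - 1]))
-- ===== Notes on version B (the rewrite author's own statement) =====
-- stated objective: alternative
-- what changed: B replaces A's left-to-right linear scan for the first index where the (descending) redemptions curve meets or drops below the (ascending) costs curve with a binary search over that monotone crossing predicate, then reproduces A's branch logic once at the found index.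
import Mathlib
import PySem

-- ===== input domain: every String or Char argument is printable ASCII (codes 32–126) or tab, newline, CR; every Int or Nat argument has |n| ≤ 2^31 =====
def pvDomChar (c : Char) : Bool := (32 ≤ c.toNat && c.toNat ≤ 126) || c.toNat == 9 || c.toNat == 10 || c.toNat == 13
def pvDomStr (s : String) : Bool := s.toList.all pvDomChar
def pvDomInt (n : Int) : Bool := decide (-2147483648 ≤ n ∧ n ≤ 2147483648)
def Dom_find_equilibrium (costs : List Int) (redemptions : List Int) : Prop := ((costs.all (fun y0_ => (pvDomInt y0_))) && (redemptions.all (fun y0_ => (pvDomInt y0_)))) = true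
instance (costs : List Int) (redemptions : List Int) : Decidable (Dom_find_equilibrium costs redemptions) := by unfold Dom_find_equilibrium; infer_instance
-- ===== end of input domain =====

-- B replaces A's linear scan for the supply/demand crossing index with a binary search
-- over the monotone predicate "redemptions[i] <= costs[i]" (objective: alternative).

-- ===== PORT A =====
-- A's for-loop 'for i in range(len(redemptions))', counting i upward; Python's
-- IndexError on costs[i] (pyGet? = none) yields the junk value (0, 0) — exactly
-- those inputs are excluded by Pre_find_equilibrium.
def feLoopA (cs rs : List Int) : Nat → Nat → Int × Int
  | 0, _ => (-1, -1)                      -- range exhausted: no equilibrium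
  | fuel + 1, i =>
    match PySem.List.pyGet? rs (i : Int) with
    | none => (0, 0)      -- unreachable: fuel counts the remaining indices of rs
    | some r =>
      match PySem.List.pyGet? cs (i : Int) with
      | none => (0, 0)    -- IndexError in Python (outside Pre_)
      | some c =>
        if r = c then ((i : Int), r)
        else if r < c then
          match PySem.List.pyGet? cs ((i : Int) - 1) with
          | none => (0, 0)  -- unreachable: cs ≠ [] here (costs[-1] wraps)
          | some p => ((i : Int), max r p)
        else feLoopA cs rs fuel (i + 1)

def find_equilibrium (costs : List Int) (redemptions : List Int) : Int × Int :=
  let cs := PySem.List.sorted costs (fun x => x) false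
  let rs := PySem.List.sorted redemptions (fun x => x) true
  feLoopA cs rs rs.length 0

-- ===== PORT B =====
-- B's while-loop: binary search for the first index in [lo, hi) with
-- rs[mid] <= cs[mid]; all probed indices are < min(len cs, len rs), so the
-- pyGetD defaults are never used.
def bsearchB (cs rs : List Int) : Nat → Nat → Nat → Nat
  | 0, lo, _ => lo                        -- fuel exhausted (fuel starts at hi - lo ≤ n)
  | fuel + 1, lo, hi =>
    if lo < hi then
      let mid := (lo + hi) / 2
      if PySem.List.pyGetD rs (mid : Int) 0 ≤ PySem.List.pyGetD cs (mid : Int) 0 then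
        bsearchB cs rs fuel lo mid
      else
        bsearchB cs rs fuel (mid + 1) hi
    else lo

def find_equilibrium_alt (costs : List Int) (redemptions : List Int) : Int × Int :=
  let cs := PySem.List.sorted costs (fun x => x) false
  let rs := PySem.List.sorted redemptions (fun x => x) true
  let n := min cs.length rs.length
  let lo := bsearchB cs rs n 0 n
  if lo = n then (-1, -1)
  else
    let r := PySem.List.pyGetD rs (lo : Int) 0
    let c := PySem.List.pyGetD cs (lo : Int) 0
    if r = c then ((lo : Int), r)
    else ((lo : Int), max r (PySem.List.pyGetD cs ((lo : Int) - 1) 0))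

-- ===== PRECONDITION & SPEC =====
-- Pre_ excludes exactly the inputs on which A raises IndexError: those where
-- len(costs) < len(redemptions) and the sorted curves do not cross within the
-- first len(costs) indices (A then reads costs[len(costs)]).
def Pre_find_equilibrium (costs : List Int) (redemptions : List Int) : Prop :=
  let cs := PySem.List.sorted costs (fun x => x) false
  let rs := PySem.List.sorted redemptions (fun x => x) true
  rs.length ≤ cs.length ∨ ∃ i < cs.length, rs.getD i 0 ≤ cs.getD i 0
instance (costs : List Int) (redemptions : List Int) : Decidable (Pre_find_equilibrium costs redemptions) := by unfold Pre_find_equilibrium; infer_instance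
def pvWitness_find_equilibrium : List Int × List Int := ([1, 2], [3, 0])

def Spec_find_equilibrium (costs : List Int) (redemptions : List Int) (out : Int × Int) : Prop := out = find_equilibrium_alt costs redemptions
instance (costs : List Int) (redemptions : List Int) (out : Int × Int) : Decidable (Spec_find_equilibrium costs redemptions out) := by unfold Spec_find_equilibrium; infer_instance

-- ===== CLAIM (what is proved, stated in full; the proofs are below) =====
def Claim_equal_find_equilibrium : Prop := ∀ (costs : List Int) (redemptions : List Int), Dom_find_equilibrium costs redemptions → Pre_find_equilibrium costs redemptions → Spec_find_equilibrium costs redemptions (find_equilibrium costs redemptions)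

-- ===== LEMMAS AND PROOFS =====

-- The crossing predicate both programs test (exactly B's loop condition).
def feP (cs rs : List Int) (i : Nat) : Prop :=
  PySem.List.pyGetD rs (i : Int) 0 ≤ PySem.List.pyGetD cs (i : Int) 0

theorem feP_iff (cs rs : List Int) (i : Nat) :
    feP cs rs i ↔ rs.getD i 0 ≤ cs.getD i 0 := by
  simp only [feP, PySem.List.pyGetD_natCast]

-- "f is the first crossing index below n (or n if there is none)".
def FirstCross (cs rs : List Int) (n f : Nat) : Prop :=
  f ≤ n ∧ (∀ i < f, ¬ feP cs rs i) ∧ (f < n → feP cs rs f)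

theorem firstCross_unique (cs rs : List Int) (n f g : Nat)
    (hf : FirstCross cs rs n f) (hg : FirstCross cs rs n g) : f = g := by
  rcases hf with ⟨hf1, hf2, hf3⟩
  rcases hg with ⟨hg1, hg2, hg3⟩
  by_contra hne
  rcases Nat.lt_or_ge f g with h | h
  · exact hg2 f h (hf3 (lt_of_lt_of_le h hg1))
  · have h' : g < f := by omega
    exact hf2 g h' (hg3 (lt_of_lt_of_le h' hf1))

-- Binary-search correctness: on a monotone predicate, bsearchB returns the
-- first crossing index (the fuel d bounds hi - lo for the induction).
theorem bsearchB_firstCross (cs rs : List Int) (n : Nat)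
    (hmono : ∀ i j : Nat, i ≤ j → j < n → feP cs rs i → feP cs rs j) :
    ∀ d lo hi, hi - lo ≤ d → lo ≤ hi → hi ≤ n →
      (∀ i < lo, ¬ feP cs rs i) → (∀ i, hi ≤ i → i < n → feP cs rs i) →
      FirstCross cs rs n (bsearchB cs rs d lo hi) := by
  intro d
  induction d with
  | zero =>
    intro lo hi hd hlh hhn hlow hhigh
    simp only [bsearchB]
    exact ⟨by omega, hlow, fun h => hhigh lo (by omega) h⟩
  | succ d ih =>
    intro lo hi hd hlh hhn hlow hhigh
    simp only [bsearchB]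
    by_cases hlt : lo < hi
    · simp only [hlt, if_true]
      by_cases hp : feP cs rs ((lo + hi) / 2)
      · have hp' := hp; unfold feP at hp'
        rw [if_pos hp']
        exact ih lo ((lo + hi) / 2) (by omega) (by omega) (by omega) hlow
          (fun i h1 h2 => hmono _ i h1 h2 hp)
      · have hp' := hp; unfold feP at hp'
        rw [if_neg hp']
        refine ih ((lo + hi) / 2 + 1) hi (by omega) (by omega) hhn ?_ hhigh
        intro i hi' hPi
        exact hp (hmono i _ (by omega) (by omega) hPi)
    · simp only [hlt, if_false]
      exact ⟨by omega, hlow, fun h => hhigh lo (by omega) h⟩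

-- A's scan, started at any index k with no crossing below k, returns the
-- branch value at the first crossing index L (or (-1,-1) if there is none).
theorem feLoopA_eq (cs rs : List Int) (n L : Nat)
    (_hn1 : n ≤ cs.length) (hn2 : n ≤ rs.length)
    (hn3 : n = cs.length ∨ n = rs.length)
    (hL : FirstCross cs rs n L)
    (hpre : rs.length ≤ cs.length ∨ ∃ i < cs.length, rs.getD i 0 ≤ cs.getD i 0) :
    ∀ d k, d + k = rs.length → (∀ i < k, ¬ feP cs rs i) →
      feLoopA cs rs d k =
        (if L = n then ((-1 : Int), (-1 : Int))
         else
           let r := PySem.List.pyGetD rs (L : Int) 0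
           let c := PySem.List.pyGetD cs (L : Int) 0
           if r = c then ((L : Int), r)
           else ((L : Int), max r (PySem.List.pyGetD cs ((L : Int) - 1) 0))) := by
  intro d
  induction d with
  | zero =>
    intro k hd hk
    simp only [feLoopA]
    have hLn : L = n := by
      by_contra h
      have hLlt : L < n := lt_of_le_of_ne hL.1 h
      exact hk L (by omega) (hL.2.2 hLlt)
    simp [hLn]
  | succ d ih =>
    intro k hd hk
    have hklen : k < rs.length := by omega
    simp only [feLoopA]
    have hkc : k < cs.length := by
        by_contra hle
        rcases hpre with h | ⟨i, hi, hle'⟩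
        · omega
        · exact hk i (by omega) ((feP_iff cs rs i).mpr hle')
    have hkn : k < n := by rcases hn3 with h | h <;> omega
    rw [PySem.List.pyGet?_natCast rs, List.getElem?_eq_getElem hklen]
    rw [PySem.List.pyGet?_natCast cs, List.getElem?_eq_getElem hkc]
    simp only []
    have hrd : rs.getD k 0 = rs[k] := List.getD_eq_getElem rs 0 hklen
    have hcd : cs.getD k 0 = cs[k] := List.getD_eq_getElem cs 0 hkc
    by_cases heq : rs[k] = cs[k]
    · have hPk : feP cs rs k := by rw [feP_iff, hrd, hcd, heq]
      have hLk : L = k :=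
        firstCross_unique cs rs n L k hL ⟨by omega, hk, fun _ => hPk⟩
      rw [if_pos heq, hLk, if_neg (by omega)]
      simp only [PySem.List.pyGetD_natCast, hrd, hcd]
      rw [if_pos heq]
    · rw [if_neg heq]
      by_cases hlt : rs[k] < cs[k]
      · have hPk : feP cs rs k := by rw [feP_iff, hrd, hcd]; exact le_of_lt hlt
        have hLk : L = k :=
          firstCross_unique cs rs n L k hL ⟨by omega, hk, fun _ => hPk⟩
        rw [if_pos hlt, hLk, if_neg (by omega)]
        simp only [PySem.List.pyGetD_natCast, hrd, hcd]
        rw [if_neg heq]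
        -- the costs[i-1] access (wrapping to costs[-1] at i = 0)
        rcases Nat.eq_zero_or_pos k with hk0 | hk0
        · subst hk0
          have hne : cs ≠ [] := by
            intro h; rw [h] at hkc; simp at hkc
          have h1 : ((0 : Nat) : Int) - 1 = (-1 : Int) := by omega
          rw [h1, PySem.List.pyGet?_neg_one, List.getLast?_eq_some_getLast hne,
            PySem.List.pyGetD_neg_one cs 0 hne]
        · have h1 : ((k : Nat) : Int) - 1 = ((k - 1 : Nat) : Int) := by omega
          rw [h1, PySem.List.pyGet?_natCast cs,
            List.getElem?_eq_getElem (by omega : k - 1 < cs.length),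
            PySem.List.pyGetD_natCast, List.getD_eq_getElem cs 0 (by omega : k - 1 < cs.length)]
      · have hPk : ¬ feP cs rs k := by rw [feP_iff, hrd, hcd]; omega
        rw [if_neg hlt]
        refine ih (k + 1) (by omega) ?_
        intro i hi
        rcases Nat.lt_or_ge i k with h | h
        · exact hk i h
        · have hik : i = k := by omega
          rw [hik]; exact hPk

-- ===== VERDICT (by name: the statement is the Claim_ definition above) =====
theorem find_equilibrium_spec : Claim_equal_find_equilibrium := by
  intro costs redemptions _hdom hpre
  unfold Spec_find_equilibrium find_equilibrium find_equilibrium_alt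
  unfold Pre_find_equilibrium at hpre
  set cs := PySem.List.sorted costs (fun x => x) false with hcs
  set rs := PySem.List.sorted redemptions (fun x => x) true with hrs
  set n := min cs.length rs.length with hn
  have hn1 : n ≤ cs.length := Nat.min_le_left _ _
  have hn2 : n ≤ rs.length := Nat.min_le_right _ _
  have hn3 : n = cs.length ∨ n = rs.length := by
    rcases Nat.le_total cs.length rs.length with h | h
    · exact Or.inl (Nat.min_eq_left h)
    · exact Or.inr (Nat.min_eq_right h)
  have hmono : ∀ i j : Nat, i ≤ j → j < n → feP cs rs i → feP cs rs j := by
    intro i j hij hjn hPi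
    rcases Nat.eq_or_lt_of_le hij with h | h
    · rw [← h]; exact hPi
    · have hic : i < cs.length := by omega
      have hjc : j < cs.length := by omega
      have hir : i < rs.length := by omega
      have hjr : j < rs.length := by omega
      have hc : cs[i] ≤ cs[j] :=
        (List.pairwise_iff_getElem.mp (PySem.List.sorted_pairwise (xs := costs)
          (key := fun x => x))) i j hic hjc h
      have hr : rs[j] ≤ rs[i] :=
        (List.pairwise_iff_getElem.mp (PySem.List.sorted_pairwise_rev (xs := redemptions)
          (key := fun x => x))) i j hir hjr h
      rw [feP_iff, List.getD_eq_getElem rs 0 hjr, List.getD_eq_getElem cs 0 hjc]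
      rw [feP_iff, List.getD_eq_getElem rs 0 hir, List.getD_eq_getElem cs 0 hic] at hPi
      exact le_trans hr (le_trans hPi hc)
  have hpre' : rs.length ≤ cs.length ∨ ∃ i < cs.length, rs.getD i 0 ≤ cs.getD i 0 := hpre
  have hL : FirstCross cs rs n (bsearchB cs rs n 0 n) :=
    bsearchB_firstCross cs rs n hmono n 0 n (by omega) (Nat.zero_le n) (le_refl n)
      (fun i h => absurd h (Nat.not_lt_zero i))
      (fun i h1 h2 => absurd h2 (Nat.not_lt.mpr h1))
  exact feLoopA_eq cs rs n (bsearchB cs rs n 0 n) hn1 hn2 hn3 hL hpre' rs.length 0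
    (by omega) (fun i h => absurd h (Nat.not_lt_zero i))
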